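-- pv_equiv track=rewrite | github.com/yanweiser/dynamic_form_filling | src/output_matching.py | extract_nested_content
-- ===== SOURCE A (Python) =====
-- def extract_nested_content(string):
--     opened = 0
--     start = None
--     end = None
--     for i in range(len(string)):
--         if string[i] == '{':
--             opened += 1
--             if start is None:
--                 start = i
--         elif string[i] == '}':
--             opened -= 1
--             if not opened:
--                 end = i
--                 break
--     if start is None or end is None:
--         return None, string
--     if end+1 < len(string):
--         new_span, new_group = extract_nested_content(string[end+1:])
--         if new_span is not None:
--             return new_span, new_group
--     return (start, end+1), string[start:end+1]
-- ===== SOURCE B (Python) =====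
-- def extract_nested_content(string):
--     opened = 0
--     start = None
--     base = 0
--     result = None
--     for i, c in enumerate(string):
--         if c == '{':
--             opened += 1
--             if start is None:
--                 start = i
--         elif c == '}':
--             opened -= 1
--             if opened == 0:
--                 result = ((start - base, i + 1 - base), string[start:i + 1])
--                 base = i + 1
--                 start = None
--     if result is None:
--         return None, string
--     return result
-- ===== Notes on version B (the rewrite author's own statement) =====
-- stated objective: faster
-- what changed: A finds the first balanced brace group, then recurses on the sliced tail string[end+1:] for each later group; B does one left-to-right pass that resets the depth counter after each completed group and tracks the current segment's offset, so the recursion and the repeated tail slicing disappear.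
import Mathlib
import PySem

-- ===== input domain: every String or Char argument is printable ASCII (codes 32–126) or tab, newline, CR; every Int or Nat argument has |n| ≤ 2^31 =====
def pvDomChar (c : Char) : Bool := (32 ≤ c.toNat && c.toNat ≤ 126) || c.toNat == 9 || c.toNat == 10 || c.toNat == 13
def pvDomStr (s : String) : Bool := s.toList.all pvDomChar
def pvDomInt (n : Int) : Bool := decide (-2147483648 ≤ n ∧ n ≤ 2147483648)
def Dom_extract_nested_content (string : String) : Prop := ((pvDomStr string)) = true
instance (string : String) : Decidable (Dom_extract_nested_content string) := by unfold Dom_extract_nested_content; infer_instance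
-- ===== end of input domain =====

-- B replaces A's find-one-group-then-recurse-on-the-sliced-tail scheme by a single
-- left-to-right pass that resets the depth counter after each completed group and
-- keeps the offset of the current segment, so the recursion and the repeated
-- tail-slicing disappear.

-- ===== PORT A =====
-- A's scan loop: `for i in range(len(string))` with `break` when opened hits 0 at a
-- closing brace; returns A's loop variables (start, end) (end = some i: the loop broke).
def pvScanA : List Char → Nat → Int → Option Nat → Option Nat × Option Nat
  | [], _, _, start => (start, none)
  | c :: rest, i, opened, start =>
    if c = '{' then
      pvScanA rest (i + 1) (opened + 1) (if start = none then some i else start)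
    else if c = '}' then
      if opened - 1 = 0 then (start, some i)
      else pvScanA rest (i + 1) (opened - 1) start
    else pvScanA rest (i + 1) opened start

-- A's recursive body, on the character list (string[end+1:] = List.drop (en+1)).
def pvA (s : List Char) : (Option (Int × Int)) × List Char :=
  match pvScanA s 0 0 none with
  | (some st, some en) =>
    if _h : en + 1 < s.length then
      match pvA (s.drop (en + 1)) with
      | (some sp, g) => (some sp, g)
      | (none, _) => (some ((st : Int), (en : Int) + 1), (s.drop st).take (en + 1 - st))
    else (some ((st : Int), (en : Int) + 1), (s.drop st).take (en + 1 - st))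
  | _ => (none, s)
termination_by s.length
decreasing_by simp [List.length_drop]; omega

def extract_nested_content (string : String) : (Option (Int × Int)) × String :=
  match pvA string.toList with
  | (sp, g) => (sp, String.ofList g)

-- ===== PORT B =====
-- B's single loop over enumerate(string) with state (opened, start, base, result);
-- s0 is the whole string (for the slice string[start:i+1]).
-- `start.getD 0` transcribes Python's `start` at the completion point, where it is
-- always a set index (opened = 1 there, so an opening brace was seen since the reset).
def pvBloop (s0 : List Char) : List Char → Nat → Int → Option Nat → Nat →
    Option ((Int × Int) × List Char) → Option ((Int × Int) × List Char)
  | [], _, _, _, _, res => res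
  | c :: rest, i, opened, start, base, res =>
    if c = '{' then
      pvBloop s0 rest (i + 1) (opened + 1) (if start = none then some i else start) base res
    else if c = '}' then
      if opened - 1 = 0 then
        pvBloop s0 rest (i + 1) 0 none (i + 1)
          (some (((start.getD 0 : Int) - (base : Int), (i : Int) + 1 - (base : Int)),
                 (s0.drop (start.getD 0)).take (i + 1 - start.getD 0)))
      else pvBloop s0 rest (i + 1) (opened - 1) start base res
    else pvBloop s0 rest (i + 1) opened start base res

def extract_nested_content_alt (string : String) : (Option (Int × Int)) × String :=
  match pvBloop string.toList string.toList 0 0 none 0 none with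
  | none => (none, string)
  | some (sp, g) => (some sp, String.ofList g)

-- ===== PRECONDITION & SPEC =====
def Spec_extract_nested_content (string : String) (out : (Option (Int × Int)) × String) : Prop := out = extract_nested_content_alt string
instance (string : String) (out : (Option (Int × Int)) × String) : Decidable (Spec_extract_nested_content string out) := by unfold Spec_extract_nested_content; infer_instance

-- ===== CLAIM (what is proved, stated in full; the proofs are below) =====
def Claim_equal_extract_nested_content : Prop := ∀ (string : String), Dom_extract_nested_content string → Spec_extract_nested_content string (extract_nested_content string)

-- ===== LEMMAS AND PROOFS =====

-- Index bounds of the break position.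
theorem pvScanA_en_bounds : ∀ (s : List Char) (i : Nat) (opened : Int) (st a : Option Nat) (en : Nat),
    pvScanA s i opened st = (a, some en) → i ≤ en ∧ en < i + s.length := by
  intro s
  induction s with
  | nil => intro i opened st a en h; simp [pvScanA] at h
  | cons c rest ih =>
    intro i opened st a en h
    simp only [pvScanA] at h
    by_cases h1 : c = '{'
    · rw [if_pos h1] at h
      have := ih _ _ _ _ _ h; simp only [List.length_cons]; omega
    · rw [if_neg h1] at h
      by_cases h2 : c = '}'
      · rw [if_pos h2] at h
        by_cases h3 : opened - 1 = 0
        · rw [if_pos h3] at h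
          simp only [Prod.mk.injEq, Option.some.injEq] at h
          obtain ⟨-, h5⟩ := h
          subst h5; simp
        · rw [if_neg h3] at h
          have := ih _ _ _ _ _ h; simp only [List.length_cons]; omega
      · rw [if_neg h2] at h
        have := ih _ _ _ _ _ h; simp only [List.length_cons]; omega

-- A break under the invariant (start = none → opened ≤ 0) always carries a set start.
theorem pvScanA_break_start : ∀ (s : List Char) (i : Nat) (opened : Int) (st : Option Nat) (en : Nat),
    pvScanA s i opened st = (none, some en) → (st = none → opened ≤ 0) → False := by
  intro s
  induction s with
  | nil => intro i opened st en h _; simp [pvScanA] at h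
  | cons c rest ih =>
    intro i opened st en h hinv
    simp only [pvScanA] at h
    by_cases h1 : c = '{'
    · rw [if_pos h1] at h
      refine ih _ _ _ _ h ?_
      split_ifs with hs
      · simp
      · intro he; exact absurd he hs
    · rw [if_neg h1] at h
      by_cases h2 : c = '}'
      · rw [if_pos h2] at h
        by_cases h3 : opened - 1 = 0
        · rw [if_pos h3] at h
          injection h with h4 h5
          have := hinv h4; omega
        · rw [if_neg h3] at h
          exact ih _ _ _ _ h (fun he => by have := hinv he; omega)
      · rw [if_neg h2] at h
        exact ih _ _ _ _ h hinv

-- Shifting the running index shifts both returned indices.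
theorem pvScanA_shift : ∀ (s : List Char) (j i : Nat) (opened : Int) (st : Option Nat),
    pvScanA s (i + j) opened (st.map (· + j)) =
      ((pvScanA s i opened st).1.map (· + j), (pvScanA s i opened st).2.map (· + j)) := by
  intro s
  induction s with
  | nil => intro j i opened st; simp [pvScanA]
  | cons c rest ih =>
    intro j i opened st
    simp only [pvScanA]
    by_cases h1 : c = '{'
    · rw [if_pos h1, if_pos h1]
      have heq : (if st.map (· + j) = none then some (i + j) else st.map (· + j)) =
          ((if st = none then some i else st).map (· + j)) := by
        cases st <;> simp
      rw [heq, show i + j + 1 = (i + 1) + j by omega, ih]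
    · rw [if_neg h1, if_neg h1]
      by_cases h2 : c = '}'
      · rw [if_pos h2, if_pos h2]
        by_cases h3 : opened - 1 = 0
        · rw [if_pos h3, if_pos h3]; simp
        · rw [if_neg h3, if_neg h3, show i + j + 1 = (i + 1) + j by omega, ih]
      · rw [if_neg h2, if_neg h2, show i + j + 1 = (i + 1) + j by omega, ih]

-- If the scan hits no break, B's loop never completes a group: it returns res unchanged.
theorem pvBloop_no_break : ∀ (s0 s : List Char) (i : Nat) (opened : Int) (st : Option Nat)
    (b : Nat) (res : Option ((Int × Int) × List Char)) (a : Option Nat),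
    pvScanA s i opened st = (a, none) → pvBloop s0 s i opened st b res = res := by
  intro s0 s
  induction s with
  | nil => intro i opened st b res a _; simp [pvBloop]
  | cons c rest ih =>
    intro i opened st b res a h
    simp only [pvScanA] at h
    simp only [pvBloop]
    by_cases h1 : c = '{'
    · rw [if_pos h1] at h ⊢; exact ih _ _ _ _ _ _ h
    · rw [if_neg h1] at h ⊢
      by_cases h2 : c = '}'
      · rw [if_pos h2] at h ⊢
        by_cases h3 : opened - 1 = 0
        · rw [if_pos h3] at h; simp at h
        · rw [if_neg h3] at h ⊢; exact ih _ _ _ _ _ _ h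
      · rw [if_neg h2] at h ⊢; exact ih _ _ _ _ _ _ h

-- Through one completed group, B's loop records the group and restarts fresh after it.
theorem pvBloop_break : ∀ (s0 s : List Char) (i : Nat) (opened : Int) (start : Option Nat)
    (b : Nat) (res : Option ((Int × Int) × List Char)) (st en : Nat),
    pvScanA s i opened start = (some st, some en) →
    pvBloop s0 s i opened start b res =
      pvBloop s0 (s.drop (en + 1 - i)) (en + 1) 0 none (en + 1)
        (some (((st : Int) - (b : Int), (en : Int) + 1 - (b : Int)),
               (s0.drop st).take (en + 1 - st))) := by
  intro s0 s
  induction s with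
  | nil => intro i opened start b res st en h; simp [pvScanA] at h
  | cons c rest ih =>
    intro i opened start b res st en h
    simp only [pvScanA] at h
    simp only [pvBloop]
    by_cases h1 : c = '{'
    · rw [if_pos h1] at h ⊢
      have hbb := pvScanA_en_bounds rest (i + 1) (opened + 1)
        (if start = none then some i else start) (some st) en h
      rw [ih _ _ _ _ _ _ _ h,
        show (c :: rest).drop (en + 1 - i) = rest.drop (en + 1 - (i + 1)) by
          rw [show en + 1 - i = (en + 1 - (i + 1)) + 1 by omega]; simp]
    · rw [if_neg h1] at h ⊢
      by_cases h2 : c = '}'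
      · rw [if_pos h2] at h ⊢
        by_cases h3 : opened - 1 = 0
        · rw [if_pos h3] at h ⊢
          simp only [Prod.mk.injEq, Option.some.injEq] at h
          obtain ⟨h4, h5⟩ := h
          subst h5
          rw [show i + 1 - i = 1 by omega]
          simp [h4]
        · rw [if_neg h3] at h ⊢
          have hbb := pvScanA_en_bounds rest (i + 1) (opened - 1) start (some st) en h
          rw [ih _ _ _ _ _ _ _ h,
            show (c :: rest).drop (en + 1 - i) = rest.drop (en + 1 - (i + 1)) by
              rw [show en + 1 - i = (en + 1 - (i + 1)) + 1 by omega]; simp]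
      · rw [if_neg h2] at h ⊢
        have hbb := pvScanA_en_bounds rest (i + 1) opened start (some st) en h
        rw [ih _ _ _ _ _ _ _ h,
          show (c :: rest).drop (en + 1 - i) = rest.drop (en + 1 - (i + 1)) by
            rw [show en + 1 - i = (en + 1 - (i + 1)) + 1 by omega]; simp]

-- Main correspondence: B's loop in a fresh state at offset i computes, over the
-- suffix s0.drop i, exactly A's recursive result on that suffix (res as fallback).
theorem pvBloop_pvA : ∀ (n : Nat) (s0 : List Char) (i : Nat) (res : Option ((Int × Int) × List Char)),
    (s0.drop i).length ≤ n →
    pvBloop s0 (s0.drop i) i 0 none i res =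
      (match pvA (s0.drop i) with
       | (none, _) => res
       | (some sp, g) => some (sp, g)) := by
  intro n
  induction n with
  | zero =>
    intro s0 i res h
    have he : s0.drop i = [] := List.eq_nil_of_length_eq_zero (by omega)
    rw [he]
    simp [pvBloop, pvA, pvScanA]
  | succ n ih =>
    intro s0 i res hlen
    rcases e : pvScanA (s0.drop i) 0 0 none with ⟨a, b⟩
    have eshift : pvScanA (s0.drop i) i 0 none = (a.map (· + i), b.map (· + i)) := by
      have hs := pvScanA_shift (s0.drop i) i 0 0 none
      simp only [Option.map_none, Nat.zero_add] at hs
      rw [hs, e]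
    cases b with
    | none =>
      rw [pvBloop_no_break s0 _ i 0 none i res _ (by rw [eshift]; rfl)]
      rw [pvA, e]
      cases a <;> simp
    | some en =>
      cases a with
      | none => exact absurd e (fun h => pvScanA_break_start _ 0 0 none en h (by omega))
      | some st =>
        have hb := pvScanA_en_bounds (s0.drop i) 0 0 none (some st) en e
        simp only [List.length_drop] at hb hlen
        have hbrk := pvBloop_break s0 (s0.drop i) i 0 none i res (st + i) (en + i)
          (by rw [eshift]; rfl)
        rw [hbrk]
        have hd1 : en + i + 1 - i = en + 1 := by omega
        have hd2 : (s0.drop i).drop (en + 1) = s0.drop (en + i + 1) := by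
          rw [List.drop_drop]; ring_nf
        have hseg : en + i + 1 - (st + i) = en + 1 - st := by omega
        have hc1 : ((st + i : Nat) : Int) - (i : Int) = (st : Int) := by push_cast; ring
        have hc2 : ((en + i : Nat) : Int) + 1 - (i : Int) = (en : Int) + 1 := by push_cast; ring
        have hsl : s0.drop (st + i) = (s0.drop i).drop st := by
          rw [List.drop_drop]; ring_nf
        rw [hd1, hd2, hseg, hc1, hc2, hsl]
        rw [pvA, e]
        simp only [List.length_drop]
        by_cases hlt : en + 1 < (s0.drop i).length
        · simp only [List.length_drop] at hlt
          rw [dif_pos hlt]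
          have ihlen : (s0.drop (en + i + 1)).length ≤ n := by
            simp only [List.length_drop]; omega
          rw [ih s0 (en + i + 1) _ ihlen, ← hd2]
          rcases e2 : pvA ((s0.drop i).drop (en + 1)) with ⟨sp, g⟩
          cases sp <;> simp
        · have hnil : (s0.drop i).drop (en + 1) = [] :=
            List.eq_nil_of_length_eq_zero (by simp only [List.length_drop] at *; omega)
          rw [hd2] at hnil
          rw [hnil]
          simp only [pvBloop]
          rw [dif_neg (by simpa [List.length_drop] using hlt)]

-- A's fallback branch: when A finds no span it returns its input unchanged.
theorem pvA_none (s : List Char) : ∀ g, pvA s = (none, g) → g = s := by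
  intro g h
  rw [pvA] at h
  rcases e : pvScanA s 0 0 none with ⟨a, b⟩
  rw [e] at h
  match a, b with
  | some st, some en =>
    simp only at h
    split_ifs at h with h1
    · rcases e2 : pvA (s.drop (en + 1)) with ⟨sp, g2⟩
      rw [e2] at h
      cases sp <;> simp_all
    · simp at h
  | none, _ => simp_all
  | some st, none => simp_all

-- ===== VERDICT (by name: the statement is the Claim_ definition above) =====
theorem extract_nested_content_spec : Claim_equal_extract_nested_content := by
  unfold Claim_equal_extract_nested_content Spec_extract_nested_content
  intro s _
  unfold extract_nested_content extract_nested_content_alt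
  have h := pvBloop_pvA (s.toList.length) s.toList 0 none (by simp)
  simp only [List.drop_zero] at h
  rw [h]
  rcases e : pvA s.toList with ⟨sp, g⟩
  cases sp with
  | none =>
    have hg := pvA_none s.toList g e
    subst hg
    simp
  | some p => simp
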